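-- pv_equiv track=rewrite | github.com/SnocrashWang/FileExplorer | file_explorer.py | search_next
-- ===== SOURCE A (Python) =====
-- def search_in_list(string_list, target_string):
--     if not target_string:
--         return 0
--     # 遍历列表，找到目标字符串第一次出现的位置
--     for index, string in enumerate(string_list, start=1):
--         if target_string in string:
--             return index  # 返回字符串所在的位置（第几个字符串）
--     # 如果目标字符串未出现在任何字符串中
--     return -1
--
-- def search_next(json_lines, selected_data, lines, start_line, search_str):
--     while selected_data < len(json_lines):
--         line_diff = search_in_list(lines[start_line+1:], search_str)
--         if line_diff != -1:
--             next_line = start_line + line_diff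
--             return selected_data, next_line
--
--         selected_data += 1
--         start_line = 0
--     return 0, 0
-- ===== SOURCE B (Python) =====
-- def _hits(string_list, target_string):
--     return [i for i, s in enumerate(string_list, 1) if target_string in s]
--
-- def search_next(json_lines, selected_data, lines, start_line, search_str):
--     if selected_data >= len(json_lines):
--         return 0, 0
--     if not search_str:
--         return selected_data, start_line
--     hits = _hits(lines[start_line + 1:], search_str)
--     if hits:
--         return selected_data, start_line + hits[0]
--     if selected_data + 1 < len(json_lines):
--         hits = _hits(lines[1:], search_str)
--         if hits:
--             return selected_data + 1, hits[0]
--     return 0, 0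
-- ===== Notes on version B (the rewrite author's own statement) =====
-- stated objective: simpler
-- what changed: Replaced the while loop (which re-runs the identical search over lines[1:] on every iteration after the first) with straight-line code: one search from start_line+1, and at most one more search over lines[1:], since all later iterations are provably identical.
import Mathlib
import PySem

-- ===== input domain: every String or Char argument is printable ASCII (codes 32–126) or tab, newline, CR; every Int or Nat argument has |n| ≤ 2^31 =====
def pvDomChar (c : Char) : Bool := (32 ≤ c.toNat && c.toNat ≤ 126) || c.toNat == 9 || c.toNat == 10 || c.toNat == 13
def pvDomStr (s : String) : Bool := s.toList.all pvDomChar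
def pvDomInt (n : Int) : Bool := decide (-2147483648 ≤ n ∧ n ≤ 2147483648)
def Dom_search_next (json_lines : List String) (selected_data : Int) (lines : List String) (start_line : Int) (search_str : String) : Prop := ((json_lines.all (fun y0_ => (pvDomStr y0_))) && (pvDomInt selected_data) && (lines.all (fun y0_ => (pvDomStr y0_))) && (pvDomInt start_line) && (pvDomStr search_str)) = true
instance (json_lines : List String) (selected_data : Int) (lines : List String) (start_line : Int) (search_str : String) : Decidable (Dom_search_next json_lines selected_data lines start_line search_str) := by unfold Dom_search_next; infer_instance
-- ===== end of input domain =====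

-- B replaces A's while loop (whose iterations after the first all repeat the same search over
-- lines[1:]) with straight-line code doing at most two substring searches; objective: simpler.

-- ===== PORT A =====
-- search_in_list's enumerate loop, counter starts at 1
def searchInListGo (target : String) : List String → Int → Int
  | [], _ => -1
  | s :: rest, idx => if PySem.Str.isIn target s then idx else searchInListGo target rest (idx + 1)

def searchInList (string_list : List String) (target_string : String) : Int :=
  if target_string = "" then 0 else searchInListGo target_string string_list 1

def searchNextLoop (json_lines lines : List String) (search_str : String)
    (selected_data start_line : Int) : Int × Int :=
  if selected_data < (json_lines.length : Int) then
    let line_diff := searchInList (PySem.List.slice lines (some (start_line + 1)) none) search_str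
    if line_diff ≠ -1 then (selected_data, start_line + line_diff)
    else searchNextLoop json_lines lines search_str (selected_data + 1) 0
  else (0, 0)
termination_by ((json_lines.length : Int) - selected_data).toNat
decreasing_by omega

def search_next (json_lines : List String) (selected_data : Int) (lines : List String) (start_line : Int) (search_str : String) : Int × Int :=
  searchNextLoop json_lines lines search_str selected_data start_line

-- ===== PORT B =====
-- _hits: 1-based indices of the entries containing the target
def hitList (string_list : List String) (target_string : String) : List Int :=
  (PySem.List.enumerate string_list 1).filterMap
    (fun p => if PySem.Str.isIn target_string p.2 then some p.1 else none)

def search_next_alt (json_lines : List String) (selected_data : Int) (lines : List String) (start_line : Int) (search_str : String) : Int × Int :=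
  if (json_lines.length : Int) ≤ selected_data then (0, 0)
  else if search_str = "" then (selected_data, start_line)
  else
    match hitList (PySem.List.slice lines (some (start_line + 1)) none) search_str with
    | d :: _ => (selected_data, start_line + d)
    | [] =>
      if selected_data + 1 < (json_lines.length : Int) then
        match hitList (PySem.List.slice lines (some 1) none) search_str with
        | d :: _ => (selected_data + 1, d)
        | [] => (0, 0)
      else (0, 0)

-- ===== PRECONDITION & SPEC =====
def Spec_search_next (json_lines : List String) (selected_data : Int) (lines : List String) (start_line : Int) (search_str : String) (out : Int × Int) : Prop := out = search_next_alt json_lines selected_data lines start_line search_str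
instance (json_lines : List String) (selected_data : Int) (lines : List String) (start_line : Int) (search_str : String) (out : Int × Int) : Decidable (Spec_search_next json_lines selected_data lines start_line search_str out) := by unfold Spec_search_next; infer_instance

-- ===== CLAIM (what is proved, stated in full; the proofs are below) =====
def Claim_equal_search_next : Prop := ∀ (json_lines : List String) (selected_data : Int) (lines : List String) (start_line : Int) (search_str : String), Dom_search_next json_lines selected_data lines start_line search_str → Spec_search_next json_lines selected_data lines start_line search_str (search_next json_lines selected_data lines start_line search_str)

-- ===== LEMMAS AND PROOFS =====

-- search_in_list agrees with head-of-hit-list, for a nonempty target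
lemma searchInListGo_eq_hits (target : String) (ls : List String) :
    ∀ i : Int,
      searchInListGo target ls i =
        (((PySem.List.enumerate ls i).filterMap
          (fun p => if PySem.Str.isIn target p.2 then some p.1 else none)).headD (-1)) := by
  induction ls with
  | nil => intro i; rw [PySem.List.enumerate_nil]; rfl
  | cons s rest ih =>
    intro i
    rw [PySem.List.enumerate_cons, List.filterMap_cons]
    by_cases h : PySem.Str.isIn target s
    · simp only [searchInListGo, h, if_pos, List.headD_cons]
    · simp only [searchInListGo, h, Bool.false_eq_true, if_false, ih (i + 1)]

lemma searchInList_eq_hitList (ls : List String) (target : String) (h : target ≠ "") :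
    searchInList ls target = (hitList ls target).headD (-1) := by
  simp only [searchInList, h, if_false, hitList, searchInListGo_eq_hits]

-- every hit index is at least 1
lemma hitList_mem_pos {ls : List String} {target : String} {x : Int}
    (hx : x ∈ hitList ls target) : 1 ≤ x := by
  unfold hitList at hx
  rcases List.mem_filterMap.mp hx with ⟨p, hp, hpe⟩
  have hpx : p.1 = x := by by_cases h : PySem.Str.isIn target p.2 <;> simp at hpe <;> omega
  have hfst : x ∈ (PySem.List.enumerate ls 1).map (·.1) := List.mem_map.mpr ⟨p, hp, hpx⟩
  rw [PySem.List.map_fst_enumerate] at hfst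
  have := (PySem.List.mem_pyRange_one.mp hfst).1
  omega

-- after the first iteration the loop searches lines[1:] every time; if that search fails,
-- the loop runs to the end and returns (0, 0)
lemma searchNextLoop_zero_fail (json_lines lines : List String) (search_str : String)
    (hfail : searchInList (PySem.List.slice lines (some 1) none) search_str = -1) :
    ∀ n : Nat, ∀ sd : Int, ((json_lines.length : Int) - sd).toNat = n →
      searchNextLoop json_lines lines search_str sd 0 = (0, 0) := by
  intro n
  induction n with
  | zero =>
    intro sd hsd
    rw [searchNextLoop]
    have : ¬ sd < (json_lines.length : Int) := by omega
    simp [this]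
  | succ k ih =>
    intro sd hsd
    rw [searchNextLoop]
    by_cases hlt : sd < (json_lines.length : Int)
    · have h01 : (0 : Int) + 1 = 1 := by norm_num
      simp only [hlt, if_true, h01, hfail]
      simp only [ne_eq, not_true_eq_false, if_false]
      exact ih (sd + 1) (by omega)
    · simp [hlt]

theorem search_next_eq (json_lines : List String) (selected_data : Int) (lines : List String)
    (start_line : Int) (search_str : String) :
    search_next json_lines selected_data lines start_line search_str =
      search_next_alt json_lines selected_data lines start_line search_str := by
  unfold search_next
  rw [searchNextLoop]
  by_cases hlt : selected_data < (json_lines.length : Int)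
  · have hle : ¬ ((json_lines.length : Int) ≤ selected_data) := by omega
    simp only [hlt, if_true]
    by_cases hs : search_str = ""
    · subst hs
      simp [searchInList, search_next_alt, hle]
    · rw [searchInList_eq_hitList _ _ hs]
      unfold search_next_alt
      cases h1 : hitList (PySem.List.slice lines (some (start_line + 1)) none) search_str with
      | cons d ds =>
        have hd : ¬ ((d : Int) = -1) :=
          by have := hitList_mem_pos (x := d) (by rw [h1]; exact List.mem_cons_self ..); omega
        simp [hs, hd, hle]
      | nil =>
        simp only [List.headD_nil, ne_eq, not_true_eq_false, if_false]
        -- loop recurses with start_line = 0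
        rw [searchNextLoop]
        by_cases hlt2 : selected_data + 1 < (json_lines.length : Int)
        · simp only [hlt2, if_true]
          have h01 : (0 : Int) + 1 = 1 := by norm_num
          rw [h01, searchInList_eq_hitList _ _ hs]
          cases h2 : hitList (PySem.List.slice lines (some 1) none) search_str with
          | cons d ds =>
            have hd : ¬ ((d : Int) = -1) :=
              by have := hitList_mem_pos (x := d) (by rw [h2]; exact List.mem_cons_self ..); omega
            simp [hs, hd, hle]
          | nil =>
            simp only [List.headD_nil, ne_eq, not_true_eq_false, if_false]
            rw [searchNextLoop_zero_fail json_lines lines search_str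
              (by rw [searchInList_eq_hitList _ _ hs, h2]; rfl)
              ((json_lines.length : Int) - (selected_data + 1 + 1)).toNat (selected_data + 1 + 1) rfl]
            simp [hs, hle]
        · simp [hs, hle, hlt2]
  · unfold search_next_alt
    simp [hlt, (by omega : (json_lines.length : Int) ≤ selected_data)]

-- ===== VERDICT (by name: the statement is the Claim_ definition above) =====
theorem search_next_spec : Claim_equal_search_next := by
  intro json_lines selected_data lines start_line search_str _
  unfold Spec_search_next
  exact search_next_eq json_lines selected_data lines start_line search_str
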